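-- pv_equiv track=rewrite | github.com/melikazmn/mabani-python | q1.melikazamani.-8day.py | becharkh
-- ===== SOURCE A (Python) =====
-- def becharkh(lst,ghabli):
--     if len(lst) == 1:
--         return lst[0]
--     elif len(lst)%2 == 0 and ghabli == 'zoj' :
--         return becharkh(lst[1:len(lst):2],'zoj')
--
--     elif len(lst)%2 == 0 and ghabli == 'fard':
--         return becharkh(lst[0:len(lst):2],'fard')
--
--     elif len(lst)%2 == 1 and ghabli == 'zoj':
--         return becharkh(lst[1:len(lst):2],'fard')
--
--     elif len(lst)%2 == 1 and ghabli == 'fard':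
--         return becharkh(lst[0:len(lst):2],'zoj')
-- ===== SOURCE B (Python) =====
-- def becharkh(lst, ghabli):
--     # Track the survivor's index in the original list instead of slicing:
--     # off = absolute index of the current sublist's first element, step = its stride.
--     n = len(lst)
--     off = 0
--     step = 1
--     while n > 1:
--         if ghabli == 'zoj':
--             off += step
--             ghabli = 'zoj' if n % 2 == 0 else 'fard'
--             n //= 2
--         elif ghabli == 'fard':
--             ghabli = 'fard' if n % 2 == 0 else 'zoj'
--             n = (n + 1) // 2
--         else:
--             raise ValueError("ghabli must be 'zoj' or 'fard'")
--         step *= 2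
--     return lst[off]
-- ===== Notes on version B (the rewrite author's own statement) =====
-- stated objective: alternative
-- what changed: Instead of recursively building sliced sublists, B tracks the survivor's absolute index with an offset/stride pair updated per round and does one final O(1) list access; B validates ghabli and raises ValueError on unknown modes where A falls through to None.
-- outside the precondition, e.g. on becharkh([1, 2], 'x'): A returns None, B raises ValueError
import Mathlib
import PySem

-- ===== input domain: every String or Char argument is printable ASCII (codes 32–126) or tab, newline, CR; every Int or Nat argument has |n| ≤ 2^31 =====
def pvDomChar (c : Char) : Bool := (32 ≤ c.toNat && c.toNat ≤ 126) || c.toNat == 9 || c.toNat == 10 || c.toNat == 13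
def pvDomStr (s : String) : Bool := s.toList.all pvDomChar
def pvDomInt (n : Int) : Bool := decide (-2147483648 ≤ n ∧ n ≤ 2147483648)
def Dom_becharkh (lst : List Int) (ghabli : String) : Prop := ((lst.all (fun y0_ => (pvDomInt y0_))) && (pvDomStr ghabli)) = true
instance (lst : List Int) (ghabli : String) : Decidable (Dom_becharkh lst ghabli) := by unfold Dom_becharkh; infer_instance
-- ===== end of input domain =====

-- B replaces A's recursive slicing with offset/stride index tracking and a single final list access.


-- ===== PORT A =====
-- A's recursion, made total with a fuel counter (each call strictly shrinks a nonempty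
-- list, so lst.length + 1 fuel always suffices; on [] Python recurses forever —
-- RecursionError — and the fuel-out value 0 is never claimed, [] is outside Pre_).
-- The final 'else 0' is Python falling through and returning None; also outside Pre_.
def becharkhGo : Nat → List Int → String → Int
  | 0, _, _ => 0
  | fuel + 1, lst, ghabli =>
    if lst.length = 1 then (PySem.List.pyGet? lst 0).getD 0
    else if lst.length % 2 = 0 ∧ ghabli = "zoj" then
      becharkhGo fuel ((PySem.List.slice? lst (some 1) (some (lst.length : Int)) 2).getD []) "zoj"
    else if lst.length % 2 = 0 ∧ ghabli = "fard" then
      becharkhGo fuel ((PySem.List.slice? lst (some 0) (some (lst.length : Int)) 2).getD []) "fard"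
    else if lst.length % 2 = 1 ∧ ghabli = "zoj" then
      becharkhGo fuel ((PySem.List.slice? lst (some 1) (some (lst.length : Int)) 2).getD []) "fard"
    else if lst.length % 2 = 1 ∧ ghabli = "fard" then
      becharkhGo fuel ((PySem.List.slice? lst (some 0) (some (lst.length : Int)) 2).getD []) "zoj"
    else 0

def becharkh (lst : List Int) (ghabli : String) : Int :=
  becharkhGo (lst.length + 1) lst ghabli

-- ===== PORT B =====
-- B's while-loop: state (n, ghabli, off, step); returns lst[off] at the end.
-- The 0 in the last inner branch is where B's Python raises ValueError (unknown ghabli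
-- while the loop runs); those inputs are outside Pre_becharkh.
def becharkhLoop (lst : List Int) (n : Nat) (ghabli : String) (off step : Int) : Int :=
  if _h : n > 1 then
    if ghabli = "zoj" then
      becharkhLoop lst (n / 2) (if n % 2 = 0 then "zoj" else "fard") (off + step) (step * 2)
    else if ghabli = "fard" then
      becharkhLoop lst ((n + 1) / 2) (if n % 2 = 0 then "fard" else "zoj") off (step * 2)
    else 0
  else (PySem.List.pyGet? lst off).getD 0
termination_by n
decreasing_by all_goals omega

def becharkh_alt (lst : List Int) (ghabli : String) : Int :=
  becharkhLoop lst lst.length ghabli 0 1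

-- ===== PRECONDITION & SPEC =====
-- Pre_ excludes the empty list (A recurses forever, RecursionError) and, for lists of
-- length ≥ 2, any ghabli other than 'zoj'/'fard' (A falls through and returns None,
-- not an int).
def Pre_becharkh (lst : List Int) (ghabli : String) : Prop :=
  lst ≠ [] ∧ (lst.length = 1 ∨ ghabli = "zoj" ∨ ghabli = "fard")
instance (lst : List Int) (ghabli : String) : Decidable (Pre_becharkh lst ghabli) := by
  unfold Pre_becharkh; infer_instance

def pvWitness_becharkh : List Int × String := ([3, 1, 4, 1, 5], "zoj")

def Spec_becharkh (lst : List Int) (ghabli : String) (out : Int) : Prop := out = becharkh_alt lst ghabli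
instance (lst : List Int) (ghabli : String) (out : Int) : Decidable (Spec_becharkh lst ghabli out) := by unfold Spec_becharkh; infer_instance

-- ===== CLAIM (what is proved, stated in full; the proofs are below) =====
def Claim_equal_becharkh : Prop := ∀ (lst : List Int) (ghabli : String), Dom_becharkh lst ghabli → Pre_becharkh lst ghabli → Spec_becharkh lst ghabli (becharkh lst ghabli)

-- ===== LEMMAS AND PROOFS =====
-- lst[1:len(lst):2] as a map over indices 1, 3, 5, …
theorem pvSliceOdd (lst : List Int) :
    PySem.List.slice? lst (some 1) (some (lst.length : Int)) 2
      = some ((List.range (lst.length / 2)).map (fun k => lst.getD (1 + 2 * k) 0)) := by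
  unfold PySem.List.slice? PySem.List.sliceIndices
  norm_num
  have hL : ¬ ((lst.length : Int) < 0) := by omega
  simp only [if_neg hL]
  by_cases h2 : 2 ≤ lst.length
  · rw [if_pos (Or.inl (by exact_mod_cast (by omega : (1:Int) < lst.length)))]
    have hcnt : (((lst.length : Int) - min 1 ↑lst.length + 2 - 1) / 2).toNat = lst.length / 2 := by
      omega
    rw [hcnt]
    have hpt : ∀ x ∈ List.range (lst.length / 2),
        lst[(min 1 (lst.length:Int) + 2 * (x:Int)).toNat]? = some (lst.getD (1 + 2 * x) 0) := by
      intro x hx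
      simp only [List.mem_range] at hx
      have hidx : (min 1 (lst.length:Int) + 2 * (x:Int)).toNat = 1 + 2 * x := by omega
      rw [hidx, List.getElem?_eq_getElem (by omega), List.getD_eq_getElem?_getD,
        List.getElem?_eq_getElem (by omega : 1 + 2 * x < lst.length)]
      simp
    rw [List.filterMap_congr hpt]
    simp
  · rw [if_neg (by omega)]
    have : lst.length / 2 = 0 := by omega
    simp [this]

-- lst[0:len(lst):2] as a map over indices 0, 2, 4, …
theorem pvSliceEven (lst : List Int) :
    PySem.List.slice? lst (some 0) (some (lst.length : Int)) 2
      = some ((List.range ((lst.length + 1) / 2)).map (fun k => lst.getD (2 * k) 0)) := by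
  unfold PySem.List.slice? PySem.List.sliceIndices
  norm_num
  have hL : ¬ ((lst.length : Int) < 0) := by omega
  simp only [if_neg hL]
  by_cases h1 : 1 ≤ lst.length
  · rw [if_pos (by exact_mod_cast (by omega : (0:Int) < lst.length))]
    have hcnt : (((lst.length : Int) + 2 - 1) / 2).toNat = (lst.length + 1) / 2 := by omega
    rw [hcnt]
    have hpt : ∀ x ∈ List.range ((lst.length + 1) / 2),
        lst[(2 * (x:Int)).toNat]? = some (lst.getD (2 * x) 0) := by
      intro x hx
      simp only [List.mem_range] at hx
      have hidx : (2 * (x:Int)).toNat = 2 * x := by omega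
      rw [hidx, List.getElem?_eq_getElem (by omega), List.getD_eq_getElem?_getD,
        List.getElem?_eq_getElem (by omega : 2 * x < lst.length)]
      simp
    rw [List.filterMap_congr hpt]
    simp
  · rw [if_neg (by omega)]
    have : (lst.length + 1) / 2 = 0 := by omega
    simp [this]

-- Relative index of the survivor in a list of length n (the common skeleton of both ports).
def idxB : Nat → String → Nat
  | n, g =>
    if _h : n ≤ 1 then 0
    else if g = "zoj" then 1 + 2 * idxB (n / 2) (if n % 2 = 0 then "zoj" else "fard")
    else 2 * idxB ((n + 1) / 2) (if n % 2 = 0 then "fard" else "zoj")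
termination_by n _ => n
decreasing_by all_goals omega

theorem idxB_lt (n : Nat) (g : String) (h : 1 ≤ n) : idxB n g < n := by
  fun_induction idxB n g with
  | case1 n g hle => omega
  | case2 n hle ih => simp only [dite_eq_ite] at ih; have := ih (by omega); omega
  | case3 n g hle hg ih => simp only [dite_eq_ite] at ih; have := ih (by omega); omega

theorem loop_eq (lst : List Int) (n : Nat) (g : String) (off step : Int)
    (hg : g = "zoj" ∨ g = "fard") :
    becharkhLoop lst n g off step
      = (PySem.List.pyGet? lst (off + step * (idxB n g : Int))).getD 0 := by
  fun_induction becharkhLoop lst n g off step with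
  | case1 n off step h1 ih =>
    simp only [dite_eq_ite] at ih
    rw [ih (by split <;> simp)]
    have hidx : idxB n "zoj" = 1 + 2 * idxB (n / 2) (if n % 2 = 0 then "zoj" else "fard") := by
      rw [idxB, dif_neg (by omega : ¬ n ≤ 1), if_pos rfl]
    rw [hidx]; push_cast; ring_nf
  | case2 n off step h1 h2 ih =>
    simp only [dite_eq_ite] at ih
    rw [ih (by split <;> simp)]
    have hidx : idxB n "fard" = 2 * idxB ((n + 1) / 2) (if n % 2 = 0 then "fard" else "zoj") := by
      rw [idxB, dif_neg (by omega : ¬ n ≤ 1), if_neg (by decide)]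
    rw [hidx]; push_cast; ring_nf
  | case3 n g off step h1 h2 h3 =>
    exact absurd hg (by simp [h2, h3])
  | case4 n g off step h1 =>
    have hidx : idxB n g = 0 := by rw [idxB, dif_pos (by omega : n ≤ 1)]
    rw [hidx]; norm_num

theorem getD_map_range (f : Nat → Int) (c k : Nat) (hk : k < c) :
    ((List.range c).map f).getD k 0 = f k := by
  rw [List.getD_eq_getElem?_getD, List.getElem?_map, List.getElem?_range hk]; rfl

theorem go_nil (fuel : Nat) (g : String) : becharkhGo fuel [] g = 0 := by
  induction fuel generalizing g with
  | zero => rfl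
  | succ f ih =>
    simp only [becharkhGo, List.length_nil]
    norm_num
    by_cases hz : g = "zoj"
    · rw [if_pos hz]
      have h1 : (PySem.List.slice? ([] : List Int) (some 1) (some ((0:Nat) : Int)) 2).getD []
          = [] := by
        have := pvSliceOdd ([] : List Int)
        simp only [List.length_nil] at this
        rw [this]; rfl
      simpa [h1] using ih "zoj"
    · rw [if_neg hz]
      by_cases hf : g = "fard"
      · rw [if_pos hf]
        have h0 : (PySem.List.slice? ([] : List Int) (some 0) (some ((0:Nat) : Int)) 2).getD []
            = [] := by
          have := pvSliceEven ([] : List Int)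
          simp only [List.length_nil] at this
          rw [this]; rfl
        simpa [h0] using ih "fard"
      · rw [if_neg hf]

theorem A_go_eq (fuel : Nat) : ∀ (lst : List Int) (g : String), lst.length < fuel →
    (g = "zoj" ∨ g = "fard") → becharkhGo fuel lst g = lst.getD (idxB lst.length g) 0 := by
  induction fuel with
  | zero => intro lst g h _; omega
  | succ f ih =>
    intro lst g hlt hg
    by_cases h1 : lst.length = 1
    · rw [becharkhGo, if_pos h1]
      have hidx : idxB lst.length g = 0 := by rw [h1, idxB, dif_pos (by omega)]
      have h0 : PySem.List.pyGet? lst (0 : Int) = lst[0]? := by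
        simpa using PySem.List.pyGet?_natCast lst 0
      rw [hidx, h0, List.getD_eq_getElem?_getD]
    · by_cases hnil : lst = []
      · subst hnil; rw [go_nil]; simp
      · have hlen2 : 2 ≤ lst.length := by
          have : lst.length ≠ 0 := by simpa [List.length_eq_zero_iff] using hnil
          omega
        by_cases hev : lst.length % 2 = 0
        · rcases hg with hgz | hgf
          · subst hgz
            rw [becharkhGo, if_neg h1, if_pos (And.intro hev rfl)]
            rw [pvSliceOdd, Option.getD_some,
              ih _ _ (by simp; omega) (Or.inl rfl)]
            simp only [List.length_map, List.length_range]
            rw [getD_map_range _ _ _ (idxB_lt _ _ (by omega))]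
            have hidx : idxB lst.length "zoj" = 1 + 2 * idxB (lst.length / 2) "zoj" := by
              rw [idxB, dif_neg (by omega), if_pos rfl, if_pos hev]
            rw [hidx]
          · subst hgf
            rw [becharkhGo, if_neg h1,
              if_neg (by simp : ¬ (lst.length % 2 = 0 ∧ "fard" = "zoj")),
              if_pos (And.intro hev rfl)]
            rw [pvSliceEven, Option.getD_some,
              ih _ _ (by simp; omega) (Or.inr rfl)]
            simp only [List.length_map, List.length_range]
            rw [getD_map_range _ _ _ (idxB_lt _ _ (by omega))]
            have hidx : idxB lst.length "fard" = 2 * idxB ((lst.length + 1) / 2) "fard" := by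
              rw [idxB, dif_neg (by omega), if_neg (by decide), if_pos hev]
            rw [hidx]
        · have hodd : lst.length % 2 = 1 := by omega
          rcases hg with hgz | hgf
          · subst hgz
            rw [becharkhGo, if_neg h1,
              if_neg (by simp [hev] : ¬ (lst.length % 2 = 0 ∧ "zoj" = "zoj")),
              if_neg (by simp : ¬ (lst.length % 2 = 0 ∧ "zoj" = "fard")),
              if_pos (And.intro hodd rfl)]
            rw [pvSliceOdd, Option.getD_some,
              ih _ _ (by simp; omega) (Or.inr rfl)]
            simp only [List.length_map, List.length_range]
            rw [getD_map_range _ _ _ (idxB_lt _ _ (by omega))]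
            have hidx : idxB lst.length "zoj" = 1 + 2 * idxB (lst.length / 2) "fard" := by
              rw [idxB, dif_neg (by omega), if_pos rfl, if_neg (by omega)]
            rw [hidx]
          · subst hgf
            rw [becharkhGo, if_neg h1,
              if_neg (by simp : ¬ (lst.length % 2 = 0 ∧ "fard" = "zoj")),
              if_neg (by simp [hev] : ¬ (lst.length % 2 = 0 ∧ "fard" = "fard")),
              if_neg (by simp : ¬ (lst.length % 2 = 1 ∧ "fard" = "zoj")),
              if_pos (And.intro hodd rfl)]
            rw [pvSliceEven, Option.getD_some,
              ih _ _ (by simp; omega) (Or.inl rfl)]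
            simp only [List.length_map, List.length_range]
            rw [getD_map_range _ _ _ (idxB_lt _ _ (by omega))]
            have hidx : idxB lst.length "fard" = 2 * idxB ((lst.length + 1) / 2) "zoj" := by
              rw [idxB, dif_neg (by omega), if_neg (by decide), if_neg (by omega)]
            rw [hidx]

-- ===== VERDICT (by name: the statement is the Claim_ definition above) =====
theorem becharkh_spec : Claim_equal_becharkh := by
  intro lst g _hdom hpre
  obtain ⟨hnil, hcase⟩ := hpre
  show becharkh lst g = becharkh_alt lst g
  have h0 : PySem.List.pyGet? lst (0 : Int) = lst[0]? := by
    simpa using PySem.List.pyGet?_natCast lst 0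
  by_cases hg : g = "zoj" ∨ g = "fard"
  · have hB : becharkh_alt lst g = lst.getD (idxB lst.length g) 0 := by
      unfold becharkh_alt
      rw [loop_eq lst lst.length g 0 1 hg]
      have hc : (0 : Int) + 1 * ((idxB lst.length g : Nat) : Int)
          = ((idxB lst.length g : Nat) : Int) := by ring
      rw [hc, PySem.List.pyGet?_natCast, ← List.getD_eq_getElem?_getD]
    rw [hB]
    exact A_go_eq (lst.length + 1) lst g (by omega) hg
  · have h1 : lst.length = 1 := by tauto
    have hB : becharkh_alt lst g = (PySem.List.pyGet? lst 0).getD 0 := by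
      unfold becharkh_alt
      rw [h1, becharkhLoop, dif_neg (by omega : ¬ (1:Nat) > 1)]
    unfold becharkh
    rw [becharkhGo, if_pos h1, hB]
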